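-- pv_equiv track=rewrite | github.com/idk-jatin/ImStory | nlp/core/image.py | _rank_descriptors
-- ===== SOURCE A (Python) =====
-- def _rank_descriptors(descriptors, limit=6):
--     seen = set()
--     unique = []
--     for d in descriptors:
--         if d not in seen:
--             unique.append(d)
--             seen.add(d)
--
--     def score_desc(d):
--         d_lower = d.lower()
--         if any(
--             w in d_lower
--             for w in ["rain", "fog", "snow", "wind", "storm", "weather"]
--         ):
--             return 3
--         if any(
--             w in d_lower for w in ["light", "shadow", "glow", "lamp", "sun", "dark"]
--         ):
--             return 3
--         if any(w in d_lower for w in ["style", "illustration"]):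
--             return 1
--         return 2
--
--     unique.sort(key=score_desc, reverse=True)
--     return unique[:limit]
-- ===== SOURCE B (Python) =====
-- def _score(d):
--     d_lower = d.lower()
--     if any(w in d_lower for w in ["rain", "fog", "snow", "wind", "storm", "weather"]):
--         return 3
--     if any(w in d_lower for w in ["light", "shadow", "glow", "lamp", "sun", "dark"]):
--         return 3
--     if any(w in d_lower for w in ["style", "illustration"]):
--         return 1
--     return 2
--
--
-- def _rank_descriptors(descriptors, limit=6):
--     unique = list(dict.fromkeys(descriptors))
--     ranked = (
--         [d for d in unique if _score(d) == 3]
--         + [d for d in unique if _score(d) == 2]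
--         + [d for d in unique if _score(d) == 1]
--     )
--     return ranked[:limit]
-- ===== Notes on version B (the rewrite author's own statement) =====
-- stated objective: alternative
-- what changed: Replaces the seen-set dedup loop and the stable reverse sort by dict.fromkeys dedup plus three score buckets (3,2,1) concatenated high-to-low, which yields the same stable order without sorting.
import Mathlib
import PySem

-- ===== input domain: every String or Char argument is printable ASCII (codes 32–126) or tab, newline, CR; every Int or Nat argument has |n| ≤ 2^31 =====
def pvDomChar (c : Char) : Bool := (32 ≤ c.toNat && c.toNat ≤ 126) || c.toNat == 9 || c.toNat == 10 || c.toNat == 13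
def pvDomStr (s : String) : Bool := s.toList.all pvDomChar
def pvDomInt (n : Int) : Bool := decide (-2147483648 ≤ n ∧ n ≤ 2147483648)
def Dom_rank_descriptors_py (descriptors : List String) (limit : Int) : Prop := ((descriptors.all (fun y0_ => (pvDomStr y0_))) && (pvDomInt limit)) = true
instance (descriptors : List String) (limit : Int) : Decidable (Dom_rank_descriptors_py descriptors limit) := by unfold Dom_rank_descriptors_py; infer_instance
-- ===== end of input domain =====

-- B replaces the dedup loop + stable reverse sort by dict.fromkeys dedup and three score buckets concatenated 3,2,1 (alternative decomposition, same result).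

-- shared helper: the inner score_desc of A (B's _score is the identical code); d_lower is computed once, as in Python
def scoreAux (d_lower : String) : Int :=
  if (["rain", "fog", "snow", "wind", "storm", "weather"].any (fun w => PySem.Str.isIn w d_lower)) then 3
  else if (["light", "shadow", "glow", "lamp", "sun", "dark"].any (fun w => PySem.Str.isIn w d_lower)) then 3
  else if (["style", "illustration"].any (fun w => PySem.Str.isIn w d_lower)) then 1
  else 2

def scoreDesc (d : String) : Int := scoreAux (PySem.Str.lower d)

-- ===== PORT A =====
def rank_descriptors_py (descriptors : List String) (limit : Int) : List String :=
  -- seen = set(); unique = []; for d: if d not in seen: unique.append(d); seen.add(d)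
  let st := descriptors.foldl
    (fun (p : List String × PySem.Set String) d =>
      if PySem.Set.contains p.2 d then p else (p.1 ++ [d], PySem.Set.add p.2 d))
    ([], PySem.Set.empty)
  -- unique.sort(key=score_desc, reverse=True); return unique[:limit]
  PySem.List.slice (PySem.List.sorted st.1 scoreDesc true) none (some limit)

-- ===== PORT B =====
def rank_descriptors_py_alt (descriptors : List String) (limit : Int) : List String :=
  let unique := PySem.List.dedup descriptors
  let ranked := unique.filter (fun d => scoreDesc d == 3)
     ++ unique.filter (fun d => scoreDesc d == 2)
     ++ unique.filter (fun d => scoreDesc d == 1)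
  PySem.List.slice ranked none (some limit)

-- ===== PRECONDITION & SPEC =====
def Spec_rank_descriptors_py (descriptors : List String) (limit : Int) (out : List String) : Prop := out = rank_descriptors_py_alt descriptors limit
instance (descriptors : List String) (limit : Int) (out : List String) : Decidable (Spec_rank_descriptors_py descriptors limit out) := by unfold Spec_rank_descriptors_py; infer_instance

-- ===== CLAIM (what is proved, stated in full; the proofs are below) =====
def Claim_equal_rank_descriptors_py : Prop := ∀ (descriptors : List String) (limit : Int), Dom_rank_descriptors_py descriptors limit → Spec_rank_descriptors_py descriptors limit (rank_descriptors_py descriptors limit)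

-- ===== LEMMAS AND PROOFS =====

-- the score is always 1, 2 or 3
theorem scoreDesc_cases (d : String) : scoreDesc d = 1 ∨ scoreDesc d = 2 ∨ scoreDesc d = 3 := by
  unfold scoreDesc scoreAux; split_ifs <;> simp

-- A's dedup loop computes (dedup xs, set(xs))
theorem dedup_loop (xs : List String) :
    xs.foldl (fun (p : List String × PySem.Set String) d =>
        if PySem.Set.contains p.2 d then p else (p.1 ++ [d], PySem.Set.add p.2 d))
      ([], PySem.Set.empty)
    = (PySem.List.dedup xs, PySem.Set.ofList xs) := by
  induction xs using List.reverseRecOn with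
  | nil => rfl
  | append_singleton xs x ih =>
    rw [List.foldl_append, ih]
    simp only [List.foldl_cons, List.foldl_nil, PySem.List.dedup_eq_ofList,
      PySem.Set.ofList_append_singleton, PySem.Set.add]
    by_cases h : x ∈ xs <;> simp [h]

theorem insertBy_append_of_not {α : Type} (before : α → α → Bool) (x : α) (l1 l2 : List α)
    (h : ∀ y ∈ l1, before x y = false) :
    PySem.List.insertBy before x (l1 ++ l2) = l1 ++ PySem.List.insertBy before x l2 := by
  induction l1 with
  | nil => simp
  | cons y ys ih =>
    simp only [List.cons_append, PySem.List.insertBy, h y (by simp)]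
    simp only [Bool.false_eq_true, if_false, List.cons.injEq, true_and]
    exact ih (fun z hz => h z (by simp [hz]))

theorem insertBy_of_forall_before {α : Type} (before : α → α → Bool) (x : α) (l : List α)
    (h : ∀ y ∈ l, before x y = true) :
    PySem.List.insertBy before x l = x :: l := by
  cases l with
  | nil => rfl
  | cons y ys => simp [PySem.List.insertBy, h y (by simp)]

-- stable reverse sort by a {1,2,3}-valued key is bucket 3 ++ bucket 2 ++ bucket 1
theorem sorted_rev_eq_buckets (u : List String) :
    PySem.List.sorted u scoreDesc true
      = u.filter (fun d => scoreDesc d == 3)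
        ++ u.filter (fun d => scoreDesc d == 2)
        ++ u.filter (fun d => scoreDesc d == 1) := by
  rw [PySem.List.sorted_rev_eq_foldl_insertBy]
  induction u using List.reverseRecOn with
  | nil => rfl
  | append_singleton u x ih =>
    rw [List.foldl_append, List.foldl_cons, List.foldl_nil, ih]
    simp only [List.filter_append, List.filter_singleton]
    rcases scoreDesc_cases x with h | h | h
    · -- score 1: all previous elements score ≥ 1, so x is appended at the very end
      rw [PySem.List.insertBy_of_forall_not_before]
      · simp [h]
      · intro y hy
        simp only [List.mem_append, List.mem_filter, beq_iff_eq] at hy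
        rcases hy with (⟨_, hy2⟩ | ⟨_, hy2⟩) | ⟨_, hy2⟩ <;>
          · show decide (scoreDesc y < scoreDesc x) = false
            rw [h, hy2]; decide
    · -- score 2: x goes after buckets 3 and 2 and before bucket 1
      rw [List.append_assoc, insertBy_append_of_not, ← List.append_assoc,
        insertBy_append_of_not, insertBy_of_forall_before]
      · simp [h]
      · intro y hy
        simp only [List.mem_filter, beq_iff_eq] at hy
        show decide (scoreDesc y < scoreDesc x) = true
        rw [h, hy.2]; decide
      · intro y hy
        simp only [List.mem_filter, beq_iff_eq] at hy
        show decide (scoreDesc y < scoreDesc x) = false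
        rw [h, hy.2]; decide
      · intro y hy
        simp only [List.mem_filter, beq_iff_eq] at hy
        show decide (scoreDesc y < scoreDesc x) = false
        rw [h, hy.2]; decide
    · -- score 3: x goes after bucket 3 and before buckets 2 and 1
      rw [List.append_assoc, insertBy_append_of_not, insertBy_of_forall_before]
      · simp [h]
      · intro y hy
        simp only [List.mem_append, List.mem_filter, beq_iff_eq] at hy
        rcases hy with ⟨_, hy2⟩ | ⟨_, hy2⟩ <;>
          · show decide (scoreDesc y < scoreDesc x) = true
            rw [h, hy2]; decide
      · intro y hy
        simp only [List.mem_filter, beq_iff_eq] at hy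
        show decide (scoreDesc y < scoreDesc x) = false
        rw [h, hy.2]; decide

-- ===== VERDICT (by name: the statement is the Claim_ definition above) =====
theorem rank_descriptors_py_spec : Claim_equal_rank_descriptors_py := by
  intro descriptors limit _
  unfold Spec_rank_descriptors_py rank_descriptors_py rank_descriptors_py_alt
  simp only [dedup_loop, sorted_rev_eq_buckets]
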